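-- pv_equiv track=rewrite | github.com/koruss/programming_practice | HackerRank/queensAttack.py | moveDownLeft
-- ===== SOURCE A (Python) =====
-- def moveDownLeft(n,k,r_q, c_q , obstacles):
--     count = 0
--     x = r_q - 1
--     y = c_q - 1
--     while (x >= 1 and y >= 1):
--         if ( (x,y) ) in obstacles:
--             break
--         else:
--             count += 1
--         x -=1
--         y -=1
--     return count
-- ===== SOURCE B (Python) =====
-- def moveDownLeft(n, k, r_q, c_q, obstacles):
--     limit = min(r_q - 1, c_q - 1)
--     if limit < 0:
--         limit = 0
--     best = limit
--     for ox, oy in obstacles: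
--         d = r_q - ox
--         if c_q - oy == d and 1 <= d <= limit:
--             best = min(best, d - 1)
--     return best
-- ===== Notes on version B (the rewrite author's own statement) =====
-- stated objective: faster
-- what changed: Replace the step-by-step walk down the diagonal (with a full obstacle-list membership test at every step) by a single pass over the obstacle list that keeps the minimum blocking distance on the down-left ray.
import Mathlib
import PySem

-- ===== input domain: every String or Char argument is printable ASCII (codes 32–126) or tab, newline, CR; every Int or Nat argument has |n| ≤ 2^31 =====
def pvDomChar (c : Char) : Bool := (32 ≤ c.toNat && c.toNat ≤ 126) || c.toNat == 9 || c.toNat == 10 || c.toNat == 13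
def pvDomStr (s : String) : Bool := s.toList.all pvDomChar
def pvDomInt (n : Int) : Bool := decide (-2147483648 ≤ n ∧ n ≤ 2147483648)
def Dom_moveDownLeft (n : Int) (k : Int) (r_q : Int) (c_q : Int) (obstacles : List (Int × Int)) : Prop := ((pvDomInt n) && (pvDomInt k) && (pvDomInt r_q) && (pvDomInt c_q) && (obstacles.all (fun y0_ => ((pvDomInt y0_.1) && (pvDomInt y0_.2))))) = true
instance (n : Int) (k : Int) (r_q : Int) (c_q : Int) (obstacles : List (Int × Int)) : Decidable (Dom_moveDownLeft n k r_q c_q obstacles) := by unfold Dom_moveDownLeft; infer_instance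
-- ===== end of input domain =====

-- B walks the obstacle list once instead of stepping down the diagonal; asymptotically faster when the board is large.

-- ===== PORT A =====
-- the while loop of A: step down-left, counting, until edge or obstacle
def pvLoopA (obstacles : List (Int × Int)) (x y count : Int) : Int :=
  if h : x ≥ 1 ∧ y ≥ 1 then
    if (x, y) ∈ obstacles then count
    else pvLoopA obstacles (x - 1) (y - 1) (count + 1)
  else count
termination_by (min x y).toNat
decreasing_by omega

def moveDownLeft (n : Int) (k : Int) (r_q : Int) (c_q : Int) (obstacles : List (Int × Int)) : Int :=
  pvLoopA obstacles (r_q - 1) (c_q - 1) 0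

-- ===== PORT B =====
-- B's for-loop over the obstacle list, keeping the least blocking count
def pvScanB (r c limit : Int) : List (Int × Int) → Int → Int
  | [], best => best
  | (ox, oy) :: rest, best =>
      let d := r - ox
      pvScanB r c limit rest (if c - oy = d ∧ 1 ≤ d ∧ d ≤ limit then min best (d - 1) else best)

def moveDownLeft_alt (n : Int) (k : Int) (r_q : Int) (c_q : Int) (obstacles : List (Int × Int)) : Int :=
  let limit0 := min (r_q - 1) (c_q - 1)
  let limit := if limit0 < 0 then 0 else limit0
  pvScanB r_q c_q limit obstacles limit

-- ===== PRECONDITION & SPEC =====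
def Spec_moveDownLeft (n : Int) (k : Int) (r_q : Int) (c_q : Int) (obstacles : List (Int × Int)) (out : Int) : Prop := out = moveDownLeft_alt n k r_q c_q obstacles
instance (n : Int) (k : Int) (r_q : Int) (c_q : Int) (obstacles : List (Int × Int)) (out : Int) : Decidable (Spec_moveDownLeft n k r_q c_q obstacles out) := by unfold Spec_moveDownLeft; infer_instance

-- ===== CLAIM (what is proved, stated in full; the proofs are below) =====
def Claim_equal_moveDownLeft : Prop := ∀ (n : Int) (k : Int) (r_q : Int) (c_q : Int) (obstacles : List (Int × Int)), Dom_moveDownLeft n k r_q c_q obstacles → Spec_moveDownLeft n k r_q c_q obstacles (moveDownLeft n k r_q c_q obstacles)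

-- ===== LEMMAS AND PROOFS =====

-- with limit 0 no obstacle qualifies: the scan returns its accumulator
theorem pvScanB_zero (r c : Int) (l : List (Int × Int)) (b : Int) :
    pvScanB r c 0 l b = b := by
  induction l generalizing b with
  | nil => rfl
  | cons p t ih =>
      obtain ⟨ox, oy⟩ := p
      simp only [pvScanB]
      split
      · omega
      · exact ih b

theorem pvScanB_le (r c L : Int) (l : List (Int × Int)) (b : Int) :
    pvScanB r c L l b ≤ b := by
  induction l generalizing b with
  | nil => simp [pvScanB]
  | cons p t ih =>
      obtain ⟨ox, oy⟩ := p
      simp only [pvScanB]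
      split
      · exact le_trans (ih _) (min_le_left _ _)
      · exact ih b

theorem pvScanB_nonneg (r c L : Int) (l : List (Int × Int)) (b : Int) (hb : 0 ≤ b) :
    0 ≤ pvScanB r c L l b := by
  induction l generalizing b with
  | nil => simpa [pvScanB]
  | cons p t ih =>
      obtain ⟨ox, oy⟩ := p
      simp only [pvScanB]
      split
      · exact ih _ (by omega)
      · exact ih b hb

-- if the first diagonal square is an obstacle in the list, the scan yields 0
theorem pvScanB_blocked (r c L : Int) (l : List (Int × Int)) (b : Int)
    (hb : 0 ≤ b) (hm : (r - 1, c - 1) ∈ l) (hL : 1 ≤ L) :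
    pvScanB r c L l b = 0 := by
  induction l generalizing b with
  | nil => cases hm
  | cons p t ih =>
      obtain ⟨ox, oy⟩ := p
      simp only [pvScanB]
      rcases List.mem_cons.mp hm with h1 | h2
      · have hox : ox = r - 1 := by exact congrArg Prod.fst h1.symm
        have hoy : oy = c - 1 := by exact congrArg Prod.snd h1.symm
        subst hox hoy
        have hc : c - (c - 1) = r - (r - 1) ∧ 1 ≤ r - (r - 1) ∧ r - (r - 1) ≤ L := by
          constructor; · ring_nf
          constructor <;> omega
        rw [if_pos hc]
        have hz : min b (r - (r - 1) - 1) = 0 := by omega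
        rw [hz]
        have h1 := pvScanB_le r c L t 0
        have h2 := pvScanB_nonneg r c L t 0 le_rfl
        omega
      · split
        · exact ih _ (by omega) h2
        · exact ih b hb h2

-- shifting the queen one step down-left when its first diagonal square is not in the list
theorem pvScanB_shift (r c L : Int) (l : List (Int × Int)) (b : Int)
    (hm : (r - 1, c - 1) ∉ l) :
    pvScanB r c L l b = pvScanB (r - 1) (c - 1) (L - 1) l (b - 1) + 1 := by
  induction l generalizing b with
  | nil => simp [pvScanB]
  | cons p t ih =>
      obtain ⟨ox, oy⟩ := p
      have hne : (ox, oy) ≠ ((r : Int) - 1, c - 1) := by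
        intro h; exact hm (by rw [← h]; exact List.mem_cons_self ..)
      have hmt : (r - 1, c - 1) ∉ t := fun h => hm (List.mem_cons_of_mem _ h)
      simp only [pvScanB]
      by_cases hcond : c - oy = r - ox ∧ 1 ≤ r - ox ∧ r - ox ≤ L
      · have hd1 : r - ox ≠ 1 := by
          intro h1
          apply hne
          have : ox = r - 1 := by omega
          have : oy = c - 1 := by omega
          simp_all
        have hcond' : c - 1 - oy = r - 1 - ox ∧ 1 ≤ r - 1 - ox ∧ r - 1 - ox ≤ L - 1 := by omega
        rw [if_pos hcond, if_pos hcond']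
        rw [ih _ hmt]
        congr 1
        congr 1
        omega
      · have hcond' : ¬(c - 1 - oy = r - 1 - ox ∧ 1 ≤ r - 1 - ox ∧ r - 1 - ox ≤ L - 1) := by omega
        rw [if_neg hcond, if_neg hcond']
        exact ih b hmt

-- the loop of A equals B's scan with the remaining diagonal length as limit
theorem pvLoopA_eq (obstacles : List (Int × Int)) (x y count : Int) :
    pvLoopA obstacles x y count =
      count + pvScanB (x + 1) (y + 1) (max 0 (min x y)) obstacles (max 0 (min x y)) := by
  fun_induction pvLoopA obstacles x y count with
  | case1 x y count h hmem =>
      have hL : max 0 (min x y) = min x y := by omega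
      rw [hL]
      have : (x + 1 - 1, y + 1 - 1) ∈ obstacles := by
        simpa using hmem
      rw [pvScanB_blocked _ _ _ _ _ (by omega) this (by omega)]
      omega
  | case2 x y count h hmem ih =>
      have hnm : (x + 1 - 1, y + 1 - 1) ∉ obstacles := by simpa using hmem
      rw [pvScanB_shift _ _ _ _ _ hnm]
      rw [ih]
      have e1 : x + 1 - 1 = x - 1 + 1 := by ring
      have e2 : y + 1 - 1 = y - 1 + 1 := by ring
      have e3 : max 0 (min x y) - 1 = max 0 (min (x - 1) (y - 1)) := by omega
      rw [e1, e2, e3]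
      omega
  | case3 x y count h =>
      have hL : max 0 (min x y) = 0 := by omega
      rw [hL, pvScanB_zero]
      omega

-- ===== VERDICT (by name: the statement is the Claim_ definition above) =====
theorem moveDownLeft_spec : Claim_equal_moveDownLeft := by
  intro n k r_q c_q obstacles _
  unfold Spec_moveDownLeft moveDownLeft moveDownLeft_alt
  rw [pvLoopA_eq]
  have e1 : r_q - 1 + 1 = r_q := by ring
  have e2 : c_q - 1 + 1 = c_q := by ring
  have e3 : max 0 (min (r_q - 1) (c_q - 1)) =
      (if min (r_q - 1) (c_q - 1) < 0 then 0 else min (r_q - 1) (c_q - 1)) := by omega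
  rw [e1, e2, e3]
  simp
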